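-- pv_equiv track=rewrite | github.com/frankiyonki/Ejercicios-Ordenacion | ejercicios-ordenacion/B.py | prevencion_riesgos
-- ===== SOURCE A (Python) =====
-- def prevencion_riesgos(A, x):
--     """
--     Encuentra el número mínimo de góndolas necesarias para los niños.
--
--     Args:
--         A: Lista de pesos de los niños.
--         x: Peso máximo por góndola.
--
--     Returns:
--         Número mínimo de góndolas.
--     """
--
--     n = len(A)
--     # Ordenar la lista de pesos.
--     A.sort()
--
--     # Inicializar el contador de góndolas.
--     num_gondolas = 0
--
--     # Iterar sobre los niños.
--     for i in range(n):
--         # Si el peso del niño actual es menor o igual al peso máximo,podemos meterlo en la góndola actual.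
--         if A[i] <= x:
--             num_gondolas += 1
--         else:
--             # Si el peso del niño actual es mayor que el peso máximo,necesitamos una nueva góndola.
--             num_gondolas += 2
--
--     return num_gondolas
-- ===== SOURCE B (Python) =====
-- def prevencion_riesgos(A, x):
--     # Divide and conquer over index ranges, no sort: the gondolas needed for
--     # A[lo:hi] are those for the left half plus those for the right half;
--     # a single child needs 1 gondola if weight <= x, else 2.
--     # (Does not mutate A, unlike the original, which sorts it in place.)
--     def gond(lo, hi):
--         if lo >= hi:
--             return 0
--         if hi - lo == 1:
--             return 1 if A[lo] <= x else 2
--         mid = (lo + hi) // 2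
--         return gond(lo, mid) + gond(mid, hi)
--     return gond(0, len(A))
-- ===== Notes on version B (the rewrite author's own statement) =====
-- stated objective: alternative
-- what changed: Replaces the in-place sort followed by an index loop with a sortless divide-and-conquer recursion that splits the index range in half and sums the gondolas of the two halves (and does not mutate A); O(n) work but interpreter recursion overhead makes it no faster in practice.
import Mathlib
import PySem

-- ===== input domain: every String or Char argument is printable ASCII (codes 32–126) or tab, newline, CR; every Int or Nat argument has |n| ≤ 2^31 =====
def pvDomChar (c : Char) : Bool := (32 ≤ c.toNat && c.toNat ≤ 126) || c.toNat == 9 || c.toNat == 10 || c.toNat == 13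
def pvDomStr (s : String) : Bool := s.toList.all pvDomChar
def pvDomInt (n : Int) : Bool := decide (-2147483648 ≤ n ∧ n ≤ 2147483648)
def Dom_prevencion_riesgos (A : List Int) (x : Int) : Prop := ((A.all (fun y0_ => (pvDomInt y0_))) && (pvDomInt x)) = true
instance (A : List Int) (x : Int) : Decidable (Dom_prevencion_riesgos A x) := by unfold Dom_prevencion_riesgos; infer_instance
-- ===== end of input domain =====

-- B replaces A's in-place sort + index loop with a sortless divide-and-conquer recursion over index ranges.
-- Note: A sorts its argument in place; B does not — the equivalence proved is about the return value.

-- ===== PORT A =====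
def prevencion_riesgos (A : List Int) (x : Int) : Int :=
  let n : Int := A.length
  let S := PySem.List.sorted A (fun a => a) false
  (PySem.List.pyRange 0 n 1).foldl
    (fun acc i => if PySem.List.pyGetD S i 0 ≤ x then acc + 1 else acc + 2) 0

-- ===== PORT B =====
-- B's inner 'gond(lo, hi)' closure, with the captured A and x as explicit parameters.
def pvGond (A : List Int) (x : Int) (lo hi : Int) : Int :=
  if _h1 : lo ≥ hi then 0
  else if _h2 : hi - lo = 1 then (if PySem.List.pyGetD A lo 0 ≤ x then 1 else 2)
  else
    pvGond A x lo (PySem.Int.floordiv (lo + hi) 2) +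
    pvGond A x (PySem.Int.floordiv (lo + hi) 2) hi
termination_by (hi - lo).toNat
decreasing_by
  all_goals
    have hr := PySem.Int.floordiv_mul_add_mod (lo + hi) 2
    have h0 := PySem.Int.mod_nonneg (lo + hi) (b := 2) (by omega)
    have hl := PySem.Int.mod_lt (lo + hi) (b := 2) (by omega)
    omega

def prevencion_riesgos_alt (A : List Int) (x : Int) : Int :=
  pvGond A x 0 (A.length : Int)

-- ===== PRECONDITION & SPEC =====
def Spec_prevencion_riesgos (A : List Int) (x : Int) (out : Int) : Prop := out = prevencion_riesgos_alt A x
instance (A : List Int) (x : Int) (out : Int) : Decidable (Spec_prevencion_riesgos A x out) := by unfold Spec_prevencion_riesgos; infer_instance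

-- ===== CLAIM (what is proved, stated in full; the proofs are below) =====
def Claim_equal_prevencion_riesgos : Prop := ∀ (A : List Int) (x : Int), Dom_prevencion_riesgos A x → Spec_prevencion_riesgos A x (prevencion_riesgos A x)

-- ===== LEMMAS AND PROOFS =====

-- A's loop over any list L yields c + |L| + (count of elements > x).
theorem pv_foldA (x : Int) (L : List Int) (c : Int) :
    L.foldl (fun acc a => if a ≤ x then acc + 1 else acc + 2) c
      = c + L.length + (L.countP (fun a => decide (x < a)) : Int) := by
  induction L generalizing c with
  | nil => simp
  | cons h t ih =>
    simp only [List.foldl_cons, List.countP_cons, ih]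
    by_cases hx : h ≤ x
    · have : ¬ x < h := not_lt.mpr hx
      simp [hx, this]; ring
    · have : x < h := lt_of_not_ge hx
      simp [hx, this]; ring

-- B's recursion on [lo, hi) yields (hi - lo) + (count of elements > x in that segment).
theorem pv_gond_eq (A : List Int) (x : Int) :
    ∀ (k : Nat) (lo hi : Int), (hi - lo).toNat = k → 0 ≤ lo → lo ≤ hi → hi ≤ (A.length : Int) →
      pvGond A x lo hi
        = (hi - lo) + (((A.drop lo.toNat).take (hi - lo).toNat).countP (fun a => decide (x < a)) : Int) := by
  intro k
  induction k using Nat.strong_induction_on with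
  | _ k ih =>
    intro lo hi hk h0 hlh hhl
    rw [pvGond]
    split_ifs with h1 h2 h3
    · -- lo ≥ hi, so lo = hi: empty segment
      have : hi - lo = 0 := by omega
      simp [this]
    · -- hi - lo = 1, A[lo] ≤ x
      have hlt : lo.toNat < A.length := by omega
      have hdrop : A.drop lo.toNat = A[lo.toNat] :: A.drop (lo.toNat + 1) :=
        List.drop_eq_getElem_cons hlt
      have hget : PySem.List.pyGetD A lo 0 = A[lo.toNat] :=
        PySem.List.pyGetD_eq_getElem A 0 h0 (by omega)
      have hxle : A[lo.toNat] ≤ x := by rwa [hget] at h3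
      have hnx : ¬ x < A[lo.toNat] := not_lt.mpr hxle
      have hseg : List.take ((1:Int)).toNat (A.drop lo.toNat) = [A[lo.toNat]] := by
        rw [hdrop]; rfl
      rw [h2, hseg]
      simp [hnx]
    · -- hi - lo = 1, A[lo] > x
      have hlt : lo.toNat < A.length := by omega
      have hdrop : A.drop lo.toNat = A[lo.toNat] :: A.drop (lo.toNat + 1) :=
        List.drop_eq_getElem_cons hlt
      have hget : PySem.List.pyGetD A lo 0 = A[lo.toNat] :=
        PySem.List.pyGetD_eq_getElem A 0 h0 (by omega)
      have hxgt : x < A[lo.toNat] := by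
        have := lt_of_not_ge h3; rwa [hget] at this
      have hseg : List.take ((1:Int)).toNat (A.drop lo.toNat) = [A[lo.toNat]] := by
        rw [hdrop]; rfl
      rw [h2, hseg]
      simp [hxgt]
    · -- split at mid
      set mid := PySem.Int.floordiv (lo + hi) 2 with hmid
      have hr := PySem.Int.floordiv_mul_add_mod (lo + hi) 2
      have hm0 := PySem.Int.mod_nonneg (lo + hi) (b := 2) (by omega)
      have hml := PySem.Int.mod_lt (lo + hi) (b := 2) (by omega)
      have hlm : lo < mid := by rw [hmid]; omega
      have hmh : mid < hi := by rw [hmid]; omega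
      have hL := ih (mid - lo).toNat (by omega) lo mid rfl h0 (le_of_lt hlm) (by omega)
      have hR := ih (hi - mid).toNat (by omega) mid hi rfl (by omega) (le_of_lt hmh) hhl
      rw [hL, hR]
      have hsplit : (A.drop lo.toNat).take (hi - lo).toNat
          = (A.drop lo.toNat).take (mid - lo).toNat
            ++ (A.drop mid.toNat).take (hi - mid).toNat := by
        have h1' : (hi - lo).toNat = (mid - lo).toNat + (hi - mid).toNat := by omega
        rw [h1', List.take_add, List.drop_drop]
        have : lo.toNat + (mid - lo).toNat = mid.toNat := by omega
        rw [this]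
      rw [hsplit, List.countP_append]
      push_cast
      ring

-- ===== VERDICT (by name: the statement is the Claim_ definition above) =====
theorem prevencion_riesgos_spec : Claim_equal_prevencion_riesgos := by
  intro A x _
  unfold Spec_prevencion_riesgos prevencion_riesgos prevencion_riesgos_alt
  have hlen : (PySem.List.sorted A (fun a => a) false).length = A.length :=
    (PySem.List.sorted_perm A (fun a => a) false).length_eq
  have hperm := PySem.List.sorted_perm A (fun a => a) false
  show List.foldl _ 0 (PySem.List.pyRange 0 ((A.length : Int)) 1) = _
  rw [show (A.length : Int) = ((PySem.List.sorted A (fun a => a) false).length : Int) by rw [hlen]]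
  rw [PySem.List.foldl_pyRange_zero_pyGetD' (PySem.List.sorted A (fun a => a) false) 0
        (fun acc a => if a ≤ x then acc + 1 else acc + 2) 0]
  rw [pv_foldA, hperm.countP_eq, hlen]
  rw [pv_gond_eq A x ((A.length : Int) - 0).toNat 0 (A.length : Int) rfl le_rfl (by positivity) le_rfl]
  simp
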